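-- pv_equiv track=rewrite | github.com/marcellatwin/temperature_sensor_project | temp_support.py | set_initial_drink_row
-- ===== SOURCE A (Python) =====
-- DRINKS_TABLE = [['lower_limit','temp_mid','upper_limit','drink'],  #0
--                 [-20,-20,-20,'ren 96%'],  #1
--                 [-11,-11,-11,'ren 40%'],  #2
--                 [-10,-10,-10,'karsk'],  #3
--                 [-9,-9,-9,'sterk teknert'],  #4
--                 [-8,-8,-8,'svak teknert'],  #5
--                 [-7,-7,-7,'kakao with brandy og chilli'],  #6
--                 [-6,-6,-6,'kakao with cognak'],  #7
--                 [-5,-5,-5,'kakao with cognak og krem'],  #8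
--                 [-4,-4,-4,'kakao with krem'],  #9
--                 [-3,-3,-3,'svart te'],  #10
--                 [-2,-2,-2,'frukt te'],  #11
--                 [-1,-1,-1,'ingefaer te'],  #12
--                 [0,0,0,'is vann/slush'],  #13
--                 [1,1,1,'strawberry daiquiri'],  #14
--                 [2,2,2,'sangria'],  #15
--                 [3,3,3,'sider - breezer'],  #16
--                 [4,4,4,'champagne'],  #17
--                 [5,5,5,'musserende vin'],  #18
--                 [6,6,6,'riesling'],  #19
--                 [7,7,7,'pino blanc'],  #20
--                 [8,8,8,'rosevin'],  #21
--                 [9,9,9,'chablis'],  #22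
--                 [10,10,10,'bayer'],  #23
--                 [12,12,12,'sot vin'],  #24
--                 [13,13,13,'jule ol'],  #25
--                 [14,14,14,'litt rodvin'],  #26
--                 [15,15,15,'madira'],  #27
--                 [16,16,16,'torr sterkvin'],  #28
--                 [18,18,18,'kraftig rodvin'],  #29
--                 [19,19,19,'drikk ol']]  #30
--
-- TEMP_MID_IND = DRINKS_TABLE[0].index('temp_mid')
--
-- DRINK_LIST_IND = DRINKS_TABLE[0].index('drink')
--
-- TABLE_LEN = len(DRINKS_TABLE)
--
-- def set_initial_drink_row(temp):
--     for i in range(1,TABLE_LEN):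
--         if i != TABLE_LEN - 1:
--             if i == 1 and temp < DRINKS_TABLE[i][TEMP_MID_IND]:
--                 return i, DRINKS_TABLE[i][DRINK_LIST_IND]
--             elif temp >= DRINKS_TABLE[i][TEMP_MID_IND] and temp < DRINKS_TABLE[i+1][TEMP_MID_IND]:
--                 return i, DRINKS_TABLE[i][DRINK_LIST_IND]
--         else:
--             return TABLE_LEN - 1, DRINKS_TABLE[TABLE_LEN - 1][DRINK_LIST_IND]
-- ===== SOURCE B (Python) =====
-- DRINKS_TABLE = [['lower_limit','temp_mid','upper_limit','drink'],  #0
--                 [-20,-20,-20,'ren 96%'],  #1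
--                 [-11,-11,-11,'ren 40%'],  #2
--                 [-10,-10,-10,'karsk'],  #3
--                 [-9,-9,-9,'sterk teknert'],  #4
--                 [-8,-8,-8,'svak teknert'],  #5
--                 [-7,-7,-7,'kakao with brandy og chilli'],  #6
--                 [-6,-6,-6,'kakao with cognak'],  #7
--                 [-5,-5,-5,'kakao with cognak og krem'],  #8
--                 [-4,-4,-4,'kakao with krem'],  #9
--                 [-3,-3,-3,'svart te'],  #10
--                 [-2,-2,-2,'frukt te'],  #11
--                 [-1,-1,-1,'ingefaer te'],  #12
--                 [0,0,0,'is vann/slush'],  #13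
--                 [1,1,1,'strawberry daiquiri'],  #14
--                 [2,2,2,'sangria'],  #15
--                 [3,3,3,'sider - breezer'],  #16
--                 [4,4,4,'champagne'],  #17
--                 [5,5,5,'musserende vin'],  #18
--                 [6,6,6,'riesling'],  #19
--                 [7,7,7,'pino blanc'],  #20
--                 [8,8,8,'rosevin'],  #21
--                 [9,9,9,'chablis'],  #22
--                 [10,10,10,'bayer'],  #23
--                 [12,12,12,'sot vin'],  #24
--                 [13,13,13,'jule ol'],  #25
--                 [14,14,14,'litt rodvin'],  #26
--                 [15,15,15,'madira'],  #27
--                 [16,16,16,'torr sterkvin'],  #28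
--                 [18,18,18,'kraftig rodvin'],  #29
--                 [19,19,19,'drikk ol']]  #30
--
-- TEMP_MID_IND = DRINKS_TABLE[0].index('temp_mid')
-- DRINK_LIST_IND = DRINKS_TABLE[0].index('drink')
-- TABLE_LEN = len(DRINKS_TABLE)
--
-- # sorted mid temperatures of the 30 data rows; MIDS[k] is DRINKS_TABLE[k+1][TEMP_MID_IND]
-- MIDS = [row[TEMP_MID_IND] for row in DRINKS_TABLE[1:]]
--
-- def set_initial_drink_row(temp):
--     # hand-rolled bisect_right on MIDS, then clamp 0 -> 1
--     lo, hi = 0, len(MIDS)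
--     while lo < hi:
--         mid = (lo + hi) // 2
--         if temp < MIDS[mid]:
--             hi = mid
--         else:
--             lo = mid + 1
--     row = lo if lo > 0 else 1
--     return row, DRINKS_TABLE[row][DRINK_LIST_IND]
-- ===== Notes on version B (the rewrite author's own statement) =====
-- stated objective: alternative
-- what changed: Replaces A's linear interval scan over the drink table by a hand-rolled binary search (bisect_right) over the precomputed sorted list of mid temperatures, clamping an empty-prefix bisect result up to the first data row.
import Mathlib
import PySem

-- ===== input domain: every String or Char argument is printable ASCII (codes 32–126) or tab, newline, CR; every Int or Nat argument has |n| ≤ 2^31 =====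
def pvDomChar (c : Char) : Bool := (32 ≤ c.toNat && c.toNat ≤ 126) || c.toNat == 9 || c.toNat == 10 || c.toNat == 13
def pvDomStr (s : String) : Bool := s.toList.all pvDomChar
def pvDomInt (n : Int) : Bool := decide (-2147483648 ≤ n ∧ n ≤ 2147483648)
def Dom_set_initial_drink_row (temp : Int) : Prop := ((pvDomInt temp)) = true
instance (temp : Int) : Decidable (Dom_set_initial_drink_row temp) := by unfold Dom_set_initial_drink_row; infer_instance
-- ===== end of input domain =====

-- B replaces A's linear interval scan over the table rows by a hand-rolled binary search
-- (bisect_right) on the sorted mid temperatures; objective: alternative (same exact result).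

-- The Python table's data rows 1..30 as (temp_mid, drink): the header row and the duplicated
-- lower_limit/upper_limit columns are never read by the function, so they are not modelled.
def pvTable : List (Int × String) := [
  (-20, "ren 96%"),
  (-11, "ren 40%"),
  (-10, "karsk"),
  (-9, "sterk teknert"),
  (-8, "svak teknert"),
  (-7, "kakao with brandy og chilli"),
  (-6, "kakao with cognak"),
  (-5, "kakao with cognak og krem"),
  (-4, "kakao with krem"),
  (-3, "svart te"),
  (-2, "frukt te"),
  (-1, "ingefaer te"),
  (0, "is vann/slush"),
  (1, "strawberry daiquiri"),
  (2, "sangria"),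
  (3, "sider - breezer"),
  (4, "champagne"),
  (5, "musserende vin"),
  (6, "riesling"),
  (7, "pino blanc"),
  (8, "rosevin"),
  (9, "chablis"),
  (10, "bayer"),
  (12, "sot vin"),
  (13, "jule ol"),
  (14, "litt rodvin"),
  (15, "madira"),
  (16, "torr sterkvin"),
  (18, "kraftig rodvin"),
  (19, "drikk ol")]

def TABLE_LEN : Int := 31

-- ===== PORT A =====
-- DRINKS_TABLE[i][TEMP_MID_IND] for the 1-based Python row index i
def pvMid (i : Int) : Int := (PySem.List.pyGetD pvTable (i - 1) (0, "")).1
-- DRINKS_TABLE[i][DRINK_LIST_IND] for the 1-based Python row index i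
def pvDrink (i : Int) : String := (PySem.List.pyGetD pvTable (i - 1) (0, "")).2

-- A's for-loop with early return, step for step over range(1, TABLE_LEN)
def pvALoop (temp : Int) : List Int → Option (Int × String)
  | [] => none
  | i :: rest =>
    if i ≠ TABLE_LEN - 1 then
      if i = 1 ∧ temp < pvMid i then some (i, pvDrink i)
      else if temp ≥ pvMid i ∧ temp < pvMid (i + 1) then some (i, pvDrink i)
      else pvALoop temp rest
    else some (TABLE_LEN - 1, pvDrink (TABLE_LEN - 1))

def set_initial_drink_row (temp : Int) : Int × String :=
  -- the loop always returns before falling off the range; the default is unreachable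
  (pvALoop temp (PySem.List.pyRange 1 TABLE_LEN 1)).getD (0, "")

-- ===== PORT B =====
-- MIDS = [row[TEMP_MID_IND] for row in DRINKS_TABLE[1:]]
def pvMids : List Int := pvTable.map (·.1)

-- B's while-loop binary search (bisect_right); the fuel argument only makes the recursion
-- structural — it starts at hi - lo ≥ the iteration count, so it never runs out.
-- (Python's local 'mid = (lo + hi) // 2' is inlined; lo, hi ≥ 0 so Nat division = //.)
def pvBsLoop (temp : Int) : Nat → Nat → Nat → Nat
  | 0, lo, _ => lo
  | f + 1, lo, hi =>
    if lo < hi then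
      if temp < pvMids.getD ((lo + hi) / 2) 0 then pvBsLoop temp f lo ((lo + hi) / 2)
      else pvBsLoop temp f ((lo + hi) / 2 + 1) hi
    else lo

def set_initial_drink_row_alt (temp : Int) : Int × String :=
  let lo := pvBsLoop temp pvMids.length 0 pvMids.length
  let row : Int := if lo > 0 then (lo : Int) else 1
  (row, (PySem.List.pyGetD pvTable (row - 1) (0, "")).2)

-- ===== PRECONDITION & SPEC =====
def Spec_set_initial_drink_row (temp : Int) (out : Int × String) : Prop := out = set_initial_drink_row_alt temp
instance (temp : Int) (out : Int × String) : Decidable (Spec_set_initial_drink_row temp out) := by unfold Spec_set_initial_drink_row; infer_instance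

-- ===== CLAIM (what is proved, stated in full; the proofs are below) =====
def Claim_equal_set_initial_drink_row : Prop := ∀ (temp : Int), Dom_set_initial_drink_row temp → Spec_set_initial_drink_row temp (set_initial_drink_row temp)

-- ===== LEMMAS AND PROOFS =====

-- Both programs read temp only through comparisons with the table's mid values, all of which
-- lie in [-20, 19]; so each is invariant under clamping temp to [-21, 19], and the claim
-- reduces to the 41 clamped inputs, which are checked by decide.
def pvClamp (t : Int) : Int := max (-21) (min t 19)

lemma pvMid_bounds (i : Int) : -20 ≤ pvMid i ∧ pvMid i ≤ 19 := by
  unfold pvMid PySem.List.pyGetD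
  rcases h : PySem.List.pyGet? pvTable (i - 1) with _ | p
  · simp
  · have hp : p ∈ pvTable := by
      unfold PySem.List.pyGet? at h
      rcases h' : PySem.List.pyIdx? pvTable.length (i - 1) with _ | k
      · rw [h'] at h; simp at h
      · rw [h'] at h
        exact List.mem_of_getElem? h
    simp only [Option.getD_some]
    exact (by decide : ∀ q ∈ pvTable, -20 ≤ q.1 ∧ q.1 ≤ 19) p hp

lemma pvMids_getD_bounds (k : Nat) : -20 ≤ pvMids.getD k 0 ∧ pvMids.getD k 0 ≤ 19 := by
  by_cases hk : k < pvMids.length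
  · have hmem : pvMids.getD k 0 ∈ pvMids := by
      rw [List.getD_eq_getElem _ _ hk]; exact List.getElem_mem hk
    exact (by decide : ∀ m ∈ pvMids, -20 ≤ m ∧ m ≤ 19) _ hmem
  · rw [List.getD_eq_default _ _ (by omega)]
    exact ⟨by norm_num, by norm_num⟩

lemma pvALoop_clamp (t : Int) (l : List Int) : pvALoop t l = pvALoop (pvClamp t) l := by
  induction l with
  | nil => rfl
  | cons i rest ih =>
    have h1 := pvMid_bounds i
    have h2 := pvMid_bounds (i + 1)
    simp only [pvALoop]
    split_ifs <;>
      first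
      | rfl
      | exact ih
      | (unfold pvClamp at *; omega)

lemma pvBsLoop_clamp (t : Int) (f : Nat) : ∀ lo hi, pvBsLoop t f lo hi = pvBsLoop (pvClamp t) f lo hi := by
  induction f with
  | zero => intro lo hi; rfl
  | succ f ih =>
    intro lo hi
    have h1 := pvMids_getD_bounds ((lo + hi) / 2)
    simp only [pvBsLoop]
    split_ifs <;>
      first
      | rfl
      | exact ih _ _
      | (unfold pvClamp at *; omega)

lemma pvFin : ∀ k : Nat, k < 41 → set_initial_drink_row (-21 + (k : Int)) = set_initial_drink_row_alt (-21 + (k : Int)) := by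
  decide

-- ===== VERDICT (by name: the statement is the Claim_ definition above) =====
theorem set_initial_drink_row_spec : Claim_equal_set_initial_drink_row := by
  intro temp _
  unfold Spec_set_initial_drink_row
  have hA : set_initial_drink_row temp = set_initial_drink_row (pvClamp temp) := by
    unfold set_initial_drink_row; rw [pvALoop_clamp]
  have hB : set_initial_drink_row_alt temp = set_initial_drink_row_alt (pvClamp temp) := by
    unfold set_initial_drink_row_alt; rw [pvBsLoop_clamp]
  rw [hA, hB]
  have h1 : -21 ≤ pvClamp temp ∧ pvClamp temp ≤ 19 := by unfold pvClamp; omega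
  have hk : pvClamp temp = -21 + (((pvClamp temp + 21).toNat : Nat) : Int) := by omega
  rw [hk]
  exact pvFin _ (by omega)
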